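-- pv_equiv track=rewrite | github.com/LukBartsch/LaLigaDashboard | data_manage.py | split_last_five_games
-- ===== SOURCE A (Python) =====
-- def split_last_five_games(cols: list) -> list:
--     """Split and clean five last matches scores to single items
--
--     Parameters
--     ----------
--     cols : list
--         Raw list of last five matches scores
--
--     Returns
--     -------
--     list
--         Clean list of last five last matches scores
--     """
--
--     raw_matches_list = list(cols[11])
--
--     matches_list = []
--
--     if raw_matches_list != []:
--         for single_match in raw_matches_list:
--             if single_match != "\n":
--                 matches_list.append(single_match)
--     else:
--         matches_list = ["","","","",""]
--
--     while len(matches_list) < 5: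
--         matches_list.append("")
--
--     matches_list.reverse()
--
--     del cols[11]
--
--     for single_match in matches_list:
--         cols.insert(11,single_match)
--
--     return cols
-- ===== SOURCE B (Python) =====
-- def split_last_five_games(cols: list) -> list:
--     """Recursive rewrite: one recursive pass builds the cleaned block (padding
--     emerges from a slots counter at the base case), a second recursion splices
--     it at index 11; cols is still mutated in place and returned."""
--
--     def fill(chars, slots):
--         # cleaned chars; at the end of the string emit the remaining blank slots
--         if not chars:
--             return [""] * slots
--         if chars[0] == "\n":
--             return fill(chars[1:], slots)
--         return [chars[0]] + fill(chars[1:], max(slots - 1, 0))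
--
--     def splice(lst, i):
--         if i == 0:
--             return fill(list(lst[0]), 5) + lst[1:]
--         return [lst[0]] + splice(lst[1:], i - 1)
--
--     cols[:] = splice(cols, 11)
--     return cols
-- ===== Notes on version B (the rewrite author's own statement) =====
-- stated objective: alternative
-- what changed: Replaces A's staged imperative passes (filter loop, while-padding, reverse, del, repeated insert(11,...)) by two structural recursions: fill builds the cleaned block in one recursive pass with padding emerging from a countdown slots counter at the base case, and splice rebuilds the list around index 11 recursively; no reversal, no length arithmetic over a finished list, no in-place index shifting.
import Mathlib
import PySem

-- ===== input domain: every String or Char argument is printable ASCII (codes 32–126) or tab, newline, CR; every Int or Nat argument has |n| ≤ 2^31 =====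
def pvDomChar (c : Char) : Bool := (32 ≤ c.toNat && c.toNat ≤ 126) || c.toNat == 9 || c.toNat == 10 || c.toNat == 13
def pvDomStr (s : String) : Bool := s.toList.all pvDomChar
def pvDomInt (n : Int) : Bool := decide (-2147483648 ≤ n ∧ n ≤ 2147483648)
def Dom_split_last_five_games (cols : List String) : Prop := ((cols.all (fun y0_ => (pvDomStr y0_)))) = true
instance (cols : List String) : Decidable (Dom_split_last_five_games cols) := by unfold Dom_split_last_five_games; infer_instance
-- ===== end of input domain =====

-- B replaces A's staged imperative passes (filter loop, while-padding, reverse, del,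
-- repeated insert) by two structural recursions: fill (padding from a slots counter at
-- the base case) and splice (rebuilding around index 11); same in-place mutation of cols.


-- ===== PORT A =====
-- while len(matches_list) < 5: matches_list.append("")
def pvPadLoop (ms : List String) : List String :=
  if ms.length < 5 then pvPadLoop (ms ++ [""]) else ms
termination_by 5 - ms.length
decreasing_by simp_all; omega

def split_last_five_games (cols : List String) : List String :=
  match PySem.List.pyGet? cols 11 with
  | none => []   -- IndexError; excluded by Pre_
  | some s =>
    -- raw_matches_list = list(cols[11])  (a list of one-character strings)
    let raw_matches_list : List String := s.toList.map (fun c => String.ofList [c])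
    let matches_list : List String :=
      if raw_matches_list ≠ [] then
        raw_matches_list.foldl (fun acc m => if m ≠ "\n" then acc ++ [m] else acc) []
      else ["", "", "", "", ""]
    let matches_list := pvPadLoop matches_list
    let matches_list := matches_list.reverse
    -- del cols[11]  (exact: index 11 is in range since pyGet? returned some)
    let cols1 := cols.eraseIdx 11
    -- for single_match in matches_list: cols.insert(11, single_match)
    matches_list.foldl (fun acc m => PySem.List.insert acc 11 m) cols1

-- ===== PORT B =====
-- def fill(chars, slots): recursion over the character list; blanks at the base case
def pvFill : List Char → Nat → List String
  | [], slots => List.replicate slots ""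
  | c :: rest, slots =>
    if c = '\n' then pvFill rest slots
    else String.ofList [c] :: pvFill rest (slots - 1)   -- max(slots-1,0) is Nat subtraction

-- def splice(lst, i): recursion over the list with an index countdown
def pvSplice : List String → Nat → List String
  | [], _ => []   -- lst[0] raises IndexError; excluded by Pre_
  | x :: rest, 0 => pvFill x.toList 5 ++ rest
  | x :: rest, i + 1 => x :: pvSplice rest i

def split_last_five_games_alt (cols : List String) : List String :=
  pvSplice cols 11

-- ===== PRECONDITION & SPEC =====
-- A (and B) raise IndexError on cols[11] when len(cols) < 12; nothing else raises.
def Pre_split_last_five_games (cols : List String) : Prop := 12 ≤ cols.length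
instance (cols : List String) : Decidable (Pre_split_last_five_games cols) := by
  unfold Pre_split_last_five_games; infer_instance

def pvWitness_split_last_five_games : List String :=
  ["a","b","c","d","e","f","g","h","i","j","k","WL\nD"]

def Spec_split_last_five_games (cols : List String) (out : List String) : Prop := out = split_last_five_games_alt cols
instance (cols : List String) (out : List String) : Decidable (Spec_split_last_five_games cols out) := by unfold Spec_split_last_five_games; infer_instance

-- ===== CLAIM (what is proved, stated in full; the proofs are below) =====
def Claim_equal_split_last_five_games : Prop := ∀ (cols : List String), Dom_split_last_five_games cols → Pre_split_last_five_games cols → Spec_split_last_five_games cols (split_last_five_games cols)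

-- ===== LEMMAS AND PROOFS =====

theorem pvPadLoop_eq (ms : List String) :
    pvPadLoop ms = ms ++ List.replicate (5 - ms.length) "" := by
  by_cases h : ms.length < 5
  · rw [pvPadLoop, if_pos h, pvPadLoop_eq (ms ++ [""])]
    have hlen' : (ms ++ [""]).length = ms.length + 1 := by simp
    have hk : 5 - ms.length = (5 - (ms ++ [""]).length) + 1 := by rw [hlen']; omega
    rw [hk, List.replicate_succ]
    simp
  · rw [pvPadLoop, if_neg h]
    have : 5 - ms.length = 0 := by omega
    simp [this]
termination_by 5 - ms.length
decreasing_by simp; omega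

theorem pv_filter_fold (l : List String) (init : List String) :
    l.foldl (fun acc m => if m ≠ "\n" then acc ++ [m] else acc) init
      = init ++ l.filter (fun m => m ≠ "\n") := by
  induction l generalizing init with
  | nil => simp
  | cons x xs ih =>
    rw [List.foldl_cons, List.filter_cons]
    by_cases hx : x = "\n"
    · rw [if_neg (by simp [hx]), if_neg (by simp [hx])]
      exact ih init
    · rw [if_pos (by simp [hx]), if_pos (by simp [hx]), ih]
      simp

theorem pv_insert_fold (ms l : List String) (h : 11 ≤ l.length) :
    ms.foldl (fun acc m => PySem.List.insert acc 11 m) l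
      = l.take 11 ++ ms.reverse ++ l.drop 11 := by
  induction ms generalizing l with
  | nil => simp
  | cons m rest ih =>
    have hins : PySem.List.insert l 11 m = l.take 11 ++ m :: l.drop 11 := by
      simp [PySem.List.insert, PySem.List.sliceIndices]
      have hmin : (min (11 : Int) (l.length : Int)).toNat = 11 := by omega
      rw [hmin]
    rw [List.foldl_cons, hins, ih _ (by simp; omega)]
    have h11 : (l.take 11).length = 11 := by simp; omega
    rw [List.take_left' h11, List.drop_left' h11]
    simp

theorem pv_mk_ne_nl (c : Char) : (String.ofList [c] ≠ "\n") = (c ≠ '\n') := by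
  simp [String.ext_iff, String.toList_ofList]

theorem pvFill_eq (l : List Char) (slots : Nat) :
    pvFill l slots
      = (l.filter (fun c => c ≠ '\n')).map (fun c => String.ofList [c])
        ++ List.replicate (slots - (l.filter (fun c => c ≠ '\n')).length) "" := by
  induction l generalizing slots with
  | nil => simp [pvFill]
  | cons c rest ih =>
    by_cases hc : c = '\n'
    · simp [pvFill, hc, ih]
    · rw [pvFill, if_neg hc, ih (slots - 1), List.filter_cons, if_pos (by simp [hc])]
      simp [Nat.sub_sub, Nat.add_comm]

theorem pvSplice_eq (i : Nat) (l : List String) (h : i < l.length) :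
    pvSplice l i = l.take i ++ pvFill l[i].toList 5 ++ l.drop (i + 1) := by
  induction l generalizing i with
  | nil => simp at h
  | cons x rest ih =>
    cases i with
    | zero => simp [pvSplice]
    | succ j =>
      rw [pvSplice, ih j (by simpa using h)]
      simp

theorem split_last_five_games_spec : Claim_equal_split_last_five_games := by
  intro cols _ hpre
  unfold Spec_split_last_five_games split_last_five_games split_last_five_games_alt
  have hlen : 11 < cols.length := by
    have := hpre; unfold Pre_split_last_five_games at this; omega
  obtain ⟨s, hs, hsv⟩ : ∃ s, PySem.List.pyGet? cols 11 = some s ∧ s = cols[11] := by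
    rw [show ((11 : Int)) = ((11 : Nat) : Int) by norm_num, PySem.List.pyGet?_natCast]
    exact ⟨cols[11], by simp [List.getElem?_eq_getElem hlen], rfl⟩
  rw [hs]
  simp only
  set raw : List String := s.toList.map (fun c => String.ofList [c]) with hraw
  set msB : List String :=
    (s.toList.filter (fun c => c ≠ '\n')).map (fun c => String.ofList [c]) with hmsB
  -- B's recursive splice = take/fill/drop at index 11, and fill = filter + padding
  have hB : pvSplice cols 11
      = cols.take 11 ++ (msB ++ List.replicate (5 - msB.length) "") ++ cols.drop 12 := by
    rw [pvSplice_eq 11 cols hlen, pvFill_eq, ← hsv]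
    rw [hmsB]
    simp
  rw [hB]
  -- A's filtered list (over one-char strings) = B's filtered list
  have hfilt : raw.filter (fun m => m ≠ "\n") = msB := by
    rw [hraw, hmsB, List.filter_map]
    congr 1
    apply List.filter_congr
    intro c _
    simp [Function.comp, pv_mk_ne_nl]
  -- A's matches_list after the while-padding equals the filtered+padded block
  have hpad :
      pvPadLoop (if raw ≠ [] then
          raw.foldl (fun acc m => if m ≠ "\n" then acc ++ [m] else acc) []
        else ["", "", "", "", ""])
      = msB ++ List.replicate (5 - msB.length) "" := by
    by_cases hr : raw = []
    · have hsnil : s.toList = [] := by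
        rw [hraw] at hr; exact List.map_eq_nil_iff.mp hr
      rw [if_neg (by simp [hr]), pvPadLoop_eq]
      simp [hmsB, hsnil, List.replicate]
    · rw [if_pos hr, pv_filter_fold, List.nil_append, hfilt, pvPadLoop_eq]
  rw [hpad]
  -- A's del + reversed-insert loop is the same splice
  have herase : cols.eraseIdx 11 = cols.take 11 ++ cols.drop 12 :=
    List.eraseIdx_eq_take_drop_succ cols 11
  have hlen1 : 11 ≤ (cols.eraseIdx 11).length := by
    rw [List.length_eraseIdx_of_lt hlen]; omega
  rw [pv_insert_fold _ _ hlen1, List.reverse_reverse, herase]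
  have h11 : (cols.take 11).length = 11 := by simp; omega
  rw [List.take_left' h11, List.drop_left' h11]
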